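-- pv_equiv track=rewrite | github.com/stasptkk-cpu/free_knots | functions.py | _generate_all_equivalent_variants
-- ===== SOURCE A (Python) =====
-- def _generate_all_equivalent_variants(diagram):
--     """
--     Генерирует все диаграммы, эквивалентные данной (сдвиги + отражения).
--     """
--     variants = []
--     n = len(diagram)
--
--     # Все циклические сдвиги оригинальной диаграммы
--     for shift_amount in range(n):
--         shifted = shift(diagram, shift_amount)
--         variants.append(shifted)
--
--     # Все циклические сдвиги отраженной диаграммы
--     reflected = diagram[::-1]
--     for shift_amount in range(n):
--         shifted_reflected = shift(reflected, shift_amount)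
--         variants.append(shifted_reflected)
--
--     return variants
--
-- def shift(diagram, steps):
--     """
--     Циклически сдвигает хордовую диаграмму на заданное число позиций.
--
--     Диаграмма свободного узла представляет собой циклическую последовательность,
--     поэтому сдвиг не меняет топологические свойства узла, а лишь изменяет
--     начальную точку обхода диаграммы.
--
--     Параметры:
--     ----------
--     diagram : list of int
--         Исходная хордовая диаграмма
--     steps : int
--         Количество позиций для сдвига:
--         - steps > 0: сдвиг вправо
--         - steps < 0: сдвиг влево
--         - steps = 0: диаграмма без изменений
--
--     Возвращает:
--     -----------
--     list of int
--         Сдвинутая диаграмма той же длины, что и исходная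
--
--     Примеры:
--     --------
--     >>> shift([1, 2, 1, 3, 2, 3], 1)
--     [3, 1, 2, 1, 3, 2]
--     >>> shift([1, 2, 1, 3, 2, 3], -1)
--     [2, 1, 3, 2, 3, 1]
--     """
--     if not diagram or steps == 0:
--         return diagram.copy()
--
--     steps = steps % len(diagram)
--
--     if steps < 0:
--         steps = len(diagram) + steps
--
--     return diagram[-steps:] + diagram[:-steps]
-- ===== SOURCE B (Python) =====
-- def _generate_all_equivalent_variants(diagram):
--     def rotations(seq):
--         cur = list(seq)
--         out = []
--         for _ in range(len(seq)):
--             out.append(cur)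
--             cur = [cur[-1]] + cur[:-1]
--         return out
--     return rotations(diagram) + rotations(diagram[::-1])
-- ===== Notes on version B (the rewrite author's own statement) =====
-- stated objective: alternative
-- what changed: B generates the variants incrementally: each rotation is obtained from the previous one by moving its last element to the front (a rolling single-step rotation), instead of computing every shift independently from the original via modulo arithmetic and a pair of negative-index slices.
import Mathlib
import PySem

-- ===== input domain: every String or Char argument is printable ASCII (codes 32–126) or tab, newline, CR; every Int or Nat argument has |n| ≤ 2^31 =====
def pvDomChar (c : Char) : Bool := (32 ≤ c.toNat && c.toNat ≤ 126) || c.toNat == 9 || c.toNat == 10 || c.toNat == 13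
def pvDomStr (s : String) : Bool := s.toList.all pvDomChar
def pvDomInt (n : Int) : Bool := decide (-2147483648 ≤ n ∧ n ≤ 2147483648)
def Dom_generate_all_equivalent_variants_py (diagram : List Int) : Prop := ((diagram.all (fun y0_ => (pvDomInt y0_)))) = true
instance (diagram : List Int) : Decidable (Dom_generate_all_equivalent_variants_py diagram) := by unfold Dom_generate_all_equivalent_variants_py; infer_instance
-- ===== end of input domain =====

-- B builds each variant from the previous one by a single-step rotation (last element to front)
-- instead of recomputing every shift from the original by modulo arithmetic and slicing (objective: alternative).

-- ===== PORT A =====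
-- Port of helper shift (Python `shift`)
def shift_py (diagram : List Int) (steps : Int) : List Int :=
  if diagram = [] ∨ steps = 0 then diagram
  else
    let steps1 := PySem.Int.mod steps (diagram.length : Int)
    let steps2 := if steps1 < 0 then (diagram.length : Int) + steps1 else steps1
    PySem.List.slice diagram (some (-steps2)) none ++ PySem.List.slice diagram none (some (-steps2))

def generate_all_equivalent_variants_py (diagram : List Int) : List (List Int) :=
  let n : Int := (diagram.length : Int)
  let variants := (PySem.List.pyRange 0 n 1).foldl (fun acc s => acc ++ [shift_py diagram s]) []
  let reflected := diagram.reverse  -- diagram[::-1] (PySem.List.slice?_none_none_neg_one: exact)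
  (PySem.List.pyRange 0 n 1).foldl (fun acc s => acc ++ [shift_py reflected s]) variants

-- ===== PORT B =====
-- one step of the loop body: cur = [cur[-1]] + cur[:-1]
def pvRotStep (cur : List Int) : List Int :=
  match PySem.List.pyGet? cur (-1) with
  | some x => [x] ++ PySem.List.slice cur none (some (-1))
  | none => []   -- unreachable: cur is nonempty whenever the Python loop body runs

-- the for-loop of rotations(seq): k iterations left, current state cur, output accumulated head-first
def pvRotations : Nat → List Int → List (List Int)
  | 0, _ => []
  | k + 1, cur => cur :: pvRotations k (pvRotStep cur)

def generate_all_equivalent_variants_py_alt (diagram : List Int) : List (List Int) :=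
  pvRotations diagram.length diagram ++ pvRotations diagram.reverse.length diagram.reverse

-- ===== PRECONDITION & SPEC =====
def Spec_generate_all_equivalent_variants_py (diagram : List Int) (out : List (List Int)) : Prop := out = generate_all_equivalent_variants_py_alt diagram
instance (diagram : List Int) (out : List (List Int)) : Decidable (Spec_generate_all_equivalent_variants_py diagram out) := by unfold Spec_generate_all_equivalent_variants_py; infer_instance

-- ===== CLAIM (what is proved, stated in full; the proofs are below) =====
def Claim_equal_generate_all_equivalent_variants_py : Prop := ∀ (diagram : List Int), Dom_generate_all_equivalent_variants_py diagram → Spec_generate_all_equivalent_variants_py diagram (generate_all_equivalent_variants_py diagram)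

-- ===== LEMMAS AND PROOFS =====

-- A's shift by s (0 ≤ s < length) is the right rotation d.drop (n-s) ++ d.take (n-s)
theorem shift_py_eq_rot (d : List Int) (s : Nat) (hs : s < d.length) :
    shift_py d (s : Int) = d.drop (d.length - s) ++ d.take (d.length - s) := by
  have hd : d ≠ [] := by intro h; simp [h] at hs
  rcases Nat.eq_zero_or_pos s with h0 | hpos
  · subst h0
    simp [shift_py, hd]
  · have hsne : (s : Int) ≠ 0 := by exact_mod_cast Nat.pos_iff_ne_zero.mp hpos
    rw [shift_py]
    rw [if_neg (by simp [hd]; omega)]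
    simp only [PySem.Int.mod_natCast, Nat.mod_eq_of_lt hs]
    rw [if_neg (not_lt.mpr (Int.natCast_nonneg s))]
    rw [PySem.List.slice_from_neg_natCast d s hpos, PySem.List.slice_to_neg_natCast d s hpos]

-- one incremental step moves the window back by one
theorem pvRotStep_eq (d : List Int) (j : Nat) (h1 : 1 ≤ j) (h2 : j ≤ d.length) :
    pvRotStep (d.drop j ++ d.take j) = d.drop (j - 1) ++ d.take (j - 1) := by
  have hj : j - 1 < d.length := by omega
  have hget : (d.take j).getLast? = d[j - 1]? := by
    rw [List.getLast?_eq_getElem?, List.getElem?_take]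
    rw [if_pos (by simp; omega)]
    congr 1
    simp
    omega
  have hlast : (d.drop j ++ d.take j).getLast? = some d[j - 1] := by
    rw [List.getLast?_append]
    have : (d.take j).getLast? = some d[j-1] := by rw [hget, List.getElem?_eq_getElem hj]
    simp [this]
  have hlen : (d.drop j ++ d.take j).length = d.length := by simp; omega
  rw [pvRotStep]
  rw [PySem.List.pyGet?_neg_one, hlast]
  dsimp only
  have hsl := PySem.List.slice_to_neg_natCast (d.drop j ++ d.take j) 1 (by omega)
  norm_num at hsl
  rw [hsl, show d.length - j + min j d.length - 1 = d.length - 1 from by omega]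
  have e1 : List.take (d.length - 1) (List.drop j d) = List.drop j d :=
    List.take_of_length_le (by simp; omega)
  have e2 : d.length - 1 - (List.drop j d).length = j - 1 := by simp; omega
  rw [List.take_append, e1, e2, List.take_take, show min (j - 1) j = j - 1 from by omega]
  have hcons : List.drop (j - 1) d = d[j - 1] :: List.drop j d := by
    have h := List.drop_eq_getElem_cons hj
    rwa [show j - 1 + 1 = j from by omega] at h
  rw [hcons, List.singleton_append, List.cons_append]

-- the loop produces the rotations with shift amounts s, s+1, …, s+k-1
theorem pvRotations_eq (d : List Int) (k s : Nat) (hk : s + k ≤ d.length) :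
    pvRotations k (d.drop (d.length - s) ++ d.take (d.length - s))
      = (List.range k).map (fun i => d.drop (d.length - (s + i)) ++ d.take (d.length - (s + i))) := by
  induction k generalizing s with
  | zero => simp [pvRotations]
  | succ k ih =>
    rw [pvRotations]
    have hstep : pvRotStep (d.drop (d.length - s) ++ d.take (d.length - s))
        = d.drop (d.length - (s + 1)) ++ d.take (d.length - (s + 1)) := by
      have := pvRotStep_eq d (d.length - s) (by omega) (by omega)
      rwa [show d.length - s - 1 = d.length - (s + 1) by omega] at this
    rw [hstep, ih (s + 1) (by omega)]
    rw [List.range_succ_eq_map, List.map_cons, List.map_map]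
    congr 1
    apply List.map_congr_left
    intro i _
    simp only [Function.comp, Nat.succ_eq_add_one]
    rw [show s + 1 + i = s + (i + 1) by omega]

-- B's loop output, in closed form
theorem pvRotations_closed (d : List Int) :
    pvRotations d.length d
      = (List.range d.length).map (fun i => d.drop (d.length - i) ++ d.take (d.length - i)) := by
  have h := pvRotations_eq d d.length 0 (by omega)
  simpa using h

-- A's fold equals B's incremental rotation list
theorem fold_eq_rotations (d : List Int) (init : List (List Int)) :
    (PySem.List.pyRange 0 (d.length : Int) 1).foldl (fun acc s => acc ++ [shift_py d s]) init
      = init ++ pvRotations d.length d := by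
  rw [PySem.List.foldl_append_singleton_eq_map, PySem.List.pyRange_one]
  congr 1
  rw [List.map_map, pvRotations_closed]
  simp only [Int.sub_zero, Int.toNat_natCast]
  apply List.map_congr_left
  intro k hk
  have hk' : k < d.length := List.mem_range.mp hk
  have := shift_py_eq_rot d k hk'
  simp only [Function.comp]
  simpa using this

-- ===== VERDICT (by name: the statement is the Claim_ definition above) =====
theorem generate_all_equivalent_variants_py_spec : Claim_equal_generate_all_equivalent_variants_py := by
  intro d _
  show generate_all_equivalent_variants_py d = generate_all_equivalent_variants_py_alt d
  unfold generate_all_equivalent_variants_py generate_all_equivalent_variants_py_alt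
  dsimp only
  have hr : d.reverse.length = d.length := List.length_reverse
  rw [fold_eq_rotations d [], List.nil_append]
  rw [show (d.length : Int) = (d.reverse.length : Int) by rw [hr]]
  rw [fold_eq_rotations d.reverse]
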